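-- pv_equiv track=rewrite | github.com/droq-ai/lfx-tool-executor-node | lfx/src/lfx/components/data/save_file.py | update_build_config
-- ===== SOURCE A (Python) =====
-- def update_build_config(build_config, field_value, field_name=None):
--     """Update build configuration to show/hide fields based on storage location selection."""
--     if field_name != "storage_location":
--         return build_config
--
--     # Extract selected storage location
--     selected = [location["name"] for location in field_value] if isinstance(field_value, list) else []
--
--     # Hide all dynamic fields first
--     dynamic_fields = [
--         "file_name",  # Common fields (input is always visible)
--         "local_format",
--         "aws_format",
--         "gdrive_format",
--         "aws_access_key_id",
--         "aws_secret_access_key",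
--         "bucket_name",
--         "aws_region",
--         "s3_prefix",
--         "service_account_key",
--         "folder_id",
--     ]
--
--     for f_name in dynamic_fields:
--         if f_name in build_config:
--             build_config[f_name]["show"] = False
--
--     # Show fields based on selected storage location
--     if len(selected) == 1:
--         location = selected[0]
--
--         # Show file_name when any storage location is selected (input is always visible)
--         if "file_name" in build_config:
--             build_config["file_name"]["show"] = True
--
--         if location == "Local":
--             if "local_format" in build_config:
--                 build_config["local_format"]["show"] = True
--
--         elif location == "AWS":
--             aws_fields = [
--                 "aws_format",
--                 "aws_access_key_id",
--                 "aws_secret_access_key",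
--                 "bucket_name",
--                 "aws_region",
--                 "s3_prefix",
--             ]
--             for f_name in aws_fields:
--                 if f_name in build_config:
--                     build_config[f_name]["show"] = True
--
--         elif location == "Google Drive":
--             gdrive_fields = ["gdrive_format", "service_account_key", "folder_id"]
--             for f_name in gdrive_fields:
--                 if f_name in build_config:
--                     build_config[f_name]["show"] = True
--
--     return build_config
-- ===== SOURCE B (Python) =====
-- # One table-driven pass: a constant location->fields map decides visibility, then a single
-- # loop sets every dynamic field's "show" flag by membership (same in-place mutation as A).
-- LOCATION_FIELDS = {
--     "Local": ["local_format"],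
--     "AWS": ["aws_format", "aws_access_key_id", "aws_secret_access_key",
--             "bucket_name", "aws_region", "s3_prefix"],
--     "Google Drive": ["gdrive_format", "service_account_key", "folder_id"],
-- }
--
-- DYNAMIC_FIELDS = [
--     "file_name", "local_format", "aws_format", "gdrive_format",
--     "aws_access_key_id", "aws_secret_access_key", "bucket_name",
--     "aws_region", "s3_prefix", "service_account_key", "folder_id",
-- ]
--
--
-- def update_build_config(build_config, field_value, field_name=None):
--     if field_name != "storage_location":
--         return build_config
--     selected = [location["name"] for location in field_value] if isinstance(field_value, list) else []
--     visible = set()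
--     if len(selected) == 1:
--         visible = set(LOCATION_FIELDS.get(selected[0], []))
--         visible.add("file_name")
--     for f in DYNAMIC_FIELDS:
--         if f in build_config:
--             build_config[f]["show"] = f in visible
--     return build_config
-- ===== Notes on version B (the rewrite author's own statement) =====
-- stated objective: simpler
-- what changed: Replaces the hide-all pass plus the per-location if/elif show branches by a constant location->fields table and ONE membership-driven pass that sets each dynamic field's show flag directly; return value proved equal (both mutate build_config in place identically).
import Mathlib
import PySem

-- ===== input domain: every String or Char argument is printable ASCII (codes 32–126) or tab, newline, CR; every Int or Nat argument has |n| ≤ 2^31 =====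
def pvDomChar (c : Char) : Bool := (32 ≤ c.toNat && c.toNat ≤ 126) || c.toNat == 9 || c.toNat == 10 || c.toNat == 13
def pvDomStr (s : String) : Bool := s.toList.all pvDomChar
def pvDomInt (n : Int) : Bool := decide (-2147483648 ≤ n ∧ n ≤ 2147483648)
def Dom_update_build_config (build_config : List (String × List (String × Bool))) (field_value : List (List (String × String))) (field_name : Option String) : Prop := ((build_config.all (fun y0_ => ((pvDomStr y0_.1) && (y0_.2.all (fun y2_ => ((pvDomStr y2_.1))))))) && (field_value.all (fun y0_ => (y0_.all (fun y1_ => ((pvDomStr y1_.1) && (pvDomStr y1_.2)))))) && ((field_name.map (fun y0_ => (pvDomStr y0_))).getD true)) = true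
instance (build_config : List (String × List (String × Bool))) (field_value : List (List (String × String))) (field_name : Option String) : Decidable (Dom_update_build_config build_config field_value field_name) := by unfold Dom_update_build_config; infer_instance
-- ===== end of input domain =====

-- B replaces A's hide-all pass plus per-location if/elif show branches by a constant
-- location→fields table and ONE membership-driven pass; equivalence is about the returned
-- value (both Pythons mutate build_config in place in the same way).

-- ===== PORT A =====
-- shared primitive for the Python statement `if f in build_config: build_config[f]["show"] = v`
-- (guard + update of the first entry with key f; the inner `d["show"] = v` is PySem.Dict.insert)
def pvSetShow (bc : List (String × List (String × Bool))) (f : String) (v : Bool) :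
    List (String × List (String × Bool)) :=
  match bc with
  | [] => []
  | (k, d) :: rest =>
    if k = f then (k, ((PySem.Dict.mk d).insert "show" v).items) :: rest
    else (k, d) :: pvSetShow rest f v

def pvDynamicFields : List String :=
  ["file_name", "local_format", "aws_format", "gdrive_format", "aws_access_key_id",
   "aws_secret_access_key", "bucket_name", "aws_region", "s3_prefix",
   "service_account_key", "folder_id"]

def pvAwsFields : List String :=
  ["aws_format", "aws_access_key_id", "aws_secret_access_key", "bucket_name",
   "aws_region", "s3_prefix"]

def pvGdriveFields : List String := ["gdrive_format", "service_account_key", "folder_id"]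

def update_build_config (build_config : List (String × List (String × Bool))) (field_value : List (List (String × String))) (field_name : Option String) : List (String × List (String × Bool)) :=
  if field_name ≠ some "storage_location" then build_config
  else
    let selected := field_value.map (fun loc => ((PySem.Dict.mk loc).get? "name").getD "")
    let bc1 := pvDynamicFields.foldl (fun b f => pvSetShow b f false) build_config
    if selected.length = 1 then
      let location := selected.headD ""
      let bc2 := pvSetShow bc1 "file_name" true
      if location = "Local" then pvSetShow bc2 "local_format" true
      else if location = "AWS" then pvAwsFields.foldl (fun b f => pvSetShow b f true) bc2
      else if location = "Google Drive" then
        pvGdriveFields.foldl (fun b f => pvSetShow b f true) bc2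
      else bc2
    else bc1

-- ===== PORT B =====
def pvLocationFields : PySem.Dict String (List String) :=
  PySem.Dict.mk
    [("Local", ["local_format"]),
     ("AWS", ["aws_format", "aws_access_key_id", "aws_secret_access_key", "bucket_name",
              "aws_region", "s3_prefix"]),
     ("Google Drive", ["gdrive_format", "service_account_key", "folder_id"])]

def update_build_config_alt (build_config : List (String × List (String × Bool))) (field_value : List (List (String × String))) (field_name : Option String) : List (String × List (String × Bool)) :=
  if field_name ≠ some "storage_location" then build_config
  else
    let selected := field_value.map (fun loc => ((PySem.Dict.mk loc).get? "name").getD "")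
    let visible : PySem.Set String :=
      if selected.length = 1 then
        PySem.Set.add (PySem.Set.ofList (pvLocationFields.getD (selected.headD "") [])) "file_name"
      else PySem.Set.ofList []
    pvDynamicFields.foldl (fun b f => pvSetShow b f (PySem.Set.contains visible f)) build_config

-- ===== PRECONDITION & SPEC =====
-- Pre_ excludes exactly the inputs where Python A raises KeyError: field_name == "storage_location"
-- together with some field_value entry lacking the key "name" (B's Python raises there too).
def Pre_update_build_config (build_config : List (String × List (String × Bool))) (field_value : List (List (String × String))) (field_name : Option String) : Prop :=
  field_name = some "storage_location" →
    ∀ loc ∈ field_value, (PySem.Dict.mk loc).contains "name" = true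
instance (build_config : List (String × List (String × Bool))) (field_value : List (List (String × String))) (field_name : Option String) : Decidable (Pre_update_build_config build_config field_value field_name) := by unfold Pre_update_build_config; infer_instance

def pvWitness_update_build_config : (List (String × List (String × Bool))) × (List (List (String × String))) × Option String :=
  ([("file_name", [("show", false)]), ("local_format", [("show", false)])],
   [[("name", "Local")]], some "storage_location")

def Spec_update_build_config (build_config : List (String × List (String × Bool))) (field_value : List (List (String × String))) (field_name : Option String) (out : List (String × List (String × Bool))) : Prop := out = update_build_config_alt build_config field_value field_name
instance (build_config : List (String × List (String × Bool))) (field_value : List (List (String × String))) (field_name : Option String) (out : List (String × List (String × Bool))) : Decidable (Spec_update_build_config build_config field_value field_name out) := by unfold Spec_update_build_config; infer_instance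

-- ===== CLAIM (what is proved, stated in full; the proofs are below) =====
def Claim_equal_update_build_config : Prop := ∀ (build_config : List (String × List (String × Bool))) (field_value : List (List (String × String))) (field_name : Option String), Dom_update_build_config build_config field_value field_name → Pre_update_build_config build_config field_value field_name → Spec_update_build_config build_config field_value field_name (update_build_config build_config field_value field_name)

-- ===== LEMMAS AND PROOFS =====

lemma pvSetShow_self (bc : List (String × List (String × Bool))) (f : String) (v w : Bool) :
    pvSetShow (pvSetShow bc f v) f w = pvSetShow bc f w := by
  induction bc with
  | nil => rfl
  | cons p rest ih =>
    obtain ⟨k, d⟩ := p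
    by_cases h : k = f
    · have hins : ((PySem.Dict.mk (((PySem.Dict.mk d).insert "show" v).items)).insert "show" w).items
          = ((PySem.Dict.mk d).insert "show" w).items :=
        congrArg PySem.Dict.items (PySem.Dict.insert_insert_self _ _ _ _)
      simp [pvSetShow, h, hins]
    · simp [pvSetShow, h, ih]

lemma pvSetShow_comm (bc : List (String × List (String × Bool))) {f g : String} (h : f ≠ g)
    (v w : Bool) : pvSetShow (pvSetShow bc f v) g w = pvSetShow (pvSetShow bc g w) f v := by
  induction bc with
  | nil => rfl
  | cons p rest ih =>
    obtain ⟨k, d⟩ := p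
    by_cases hf : k = f <;> by_cases hg : k = g
    · exact absurd (hf ▸ hg) h
    all_goals simp [pvSetShow, hf, hg, h, Ne.symm h, ih]

lemma pvFold_congr (fields : List String) (v w : String → Bool)
    (h : ∀ f ∈ fields, v f = w f) (bc : List (String × List (String × Bool))) :
    fields.foldl (fun b f => pvSetShow b f (v f)) bc
      = fields.foldl (fun b f => pvSetShow b f (w f)) bc := by
  induction fields generalizing bc with
  | nil => rfl
  | cons f rest ih =>
    simp only [List.foldl_cons, h f (by simp)]
    exact ih (fun g hg => h g (List.mem_cons_of_mem f hg)) _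

lemma pvSetShow_fold_comm (fields : List String) (v : String → Bool) (s : String) (w : Bool)
    (hs : s ∉ fields) (bc : List (String × List (String × Bool))) :
    pvSetShow (fields.foldl (fun b f => pvSetShow b f (v f)) bc) s w
      = fields.foldl (fun b f => pvSetShow b f (v f)) (pvSetShow bc s w) := by
  induction fields generalizing bc with
  | nil => rfl
  | cons f rest ih =>
    have hfs : s ∉ rest := fun h => hs (List.mem_cons_of_mem f h)
    have hne : f ≠ s := fun h => hs (h ▸ List.mem_cons_self)
    simp only [List.foldl_cons, ih hfs, pvSetShow_comm bc (Ne.symm hne)]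

lemma pvSetShow_fold_true (fields : List String) (hnd : fields.Nodup) (s : String)
    (hs : s ∈ fields) (v : String → Bool) (bc : List (String × List (String × Bool))) :
    pvSetShow (fields.foldl (fun b f => pvSetShow b f (v f)) bc) s true
      = fields.foldl (fun b f => pvSetShow b f (f == s || v f)) bc := by
  induction fields generalizing bc with
  | nil => cases hs
  | cons f rest ih =>
    obtain ⟨hf, hndr⟩ := List.nodup_cons.mp hnd
    by_cases h : s = f
    · subst h
      simp only [List.foldl_cons, pvSetShow_fold_comm rest v s true hf, pvSetShow_self,
        beq_self_eq_true, Bool.true_or]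
      exact pvFold_congr rest v (fun g => (g == s || v g)) (fun g hg => by
        have : g ≠ s := fun hh => hf (hh ▸ hg)
        simp [this]) _
    · rcases List.mem_cons.mp hs with h' | h'
      · exact absurd h'.symm fun hh => h hh.symm
      · have hb : (f == s) = false := by
          simp only [beq_eq_false_iff_ne]; exact fun hh => h hh.symm
        simp only [List.foldl_cons, ih hndr h', hb, Bool.false_or]

-- ===== VERDICT (by name: the statement is the Claim_ definition above) =====
set_option maxHeartbeats 4000000 in
theorem update_build_config_spec : Claim_equal_update_build_config := by
  intro bc fv fn _ _
  unfold Spec_update_build_config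
  unfold update_build_config update_build_config_alt
  by_cases hfn : fn = some "storage_location"
  · rw [if_neg (not_not.mpr hfn), if_neg (not_not.mpr hfn)]
    simp only []
    generalize (fv.map (fun loc => ((PySem.Dict.mk loc).get? "name").getD "")) = sel
    by_cases hlen : sel.length = 1
    · rw [if_pos hlen, if_pos hlen]
      have hnd : pvDynamicFields.Nodup := by decide
      by_cases h1 : sel.headD "" = "Local"
      · rw [if_pos h1, h1,
            pvSetShow_fold_true pvDynamicFields hnd "file_name" (by decide) _ bc,
            pvSetShow_fold_true pvDynamicFields hnd "local_format" (by decide) _ bc]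
        refine pvFold_congr _ _ _ (fun f hf => ?_) bc
        simp only [pvDynamicFields, List.mem_cons, List.not_mem_nil, or_false] at hf
        rcases hf with rfl|rfl|rfl|rfl|rfl|rfl|rfl|rfl|rfl|rfl|rfl <;> rfl
      · rw [if_neg h1]
        by_cases h2 : sel.headD "" = "AWS"
        · rw [if_pos h2, h2]
          rw [show pvAwsFields.foldl (fun b f => pvSetShow b f true)
                (pvSetShow (pvDynamicFields.foldl (fun b f => pvSetShow b f false) bc) "file_name" true)
              = pvSetShow (pvSetShow (pvSetShow (pvSetShow (pvSetShow (pvSetShow (pvSetShow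
                  (pvDynamicFields.foldl (fun b f => pvSetShow b f false) bc)
                  "file_name" true) "aws_format" true) "aws_access_key_id" true)
                  "aws_secret_access_key" true) "bucket_name" true) "aws_region" true) "s3_prefix" true
              from rfl]
          rw [pvSetShow_fold_true pvDynamicFields hnd "file_name" (by decide) _ bc,
              pvSetShow_fold_true pvDynamicFields hnd "aws_format" (by decide) _ bc,
              pvSetShow_fold_true pvDynamicFields hnd "aws_access_key_id" (by decide) _ bc,
              pvSetShow_fold_true pvDynamicFields hnd "aws_secret_access_key" (by decide) _ bc,
              pvSetShow_fold_true pvDynamicFields hnd "bucket_name" (by decide) _ bc,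
              pvSetShow_fold_true pvDynamicFields hnd "aws_region" (by decide) _ bc,
              pvSetShow_fold_true pvDynamicFields hnd "s3_prefix" (by decide) _ bc]
          refine pvFold_congr _ _ _ (fun f hf => ?_) bc
          simp only [pvDynamicFields, List.mem_cons, List.not_mem_nil, or_false] at hf
          rcases hf with rfl|rfl|rfl|rfl|rfl|rfl|rfl|rfl|rfl|rfl|rfl <;> rfl
        · rw [if_neg h2]
          by_cases h3 : sel.headD "" = "Google Drive"
          · rw [if_pos h3, h3]
            rw [show pvGdriveFields.foldl (fun b f => pvSetShow b f true)
                  (pvSetShow (pvDynamicFields.foldl (fun b f => pvSetShow b f false) bc) "file_name" true)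
                = pvSetShow (pvSetShow (pvSetShow (pvSetShow
                    (pvDynamicFields.foldl (fun b f => pvSetShow b f false) bc)
                    "file_name" true) "gdrive_format" true) "service_account_key" true) "folder_id" true
                from rfl]
            rw [pvSetShow_fold_true pvDynamicFields hnd "file_name" (by decide) _ bc,
                pvSetShow_fold_true pvDynamicFields hnd "gdrive_format" (by decide) _ bc,
                pvSetShow_fold_true pvDynamicFields hnd "service_account_key" (by decide) _ bc,
                pvSetShow_fold_true pvDynamicFields hnd "folder_id" (by decide) _ bc]
            refine pvFold_congr _ _ _ (fun f hf => ?_) bc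
            simp only [pvDynamicFields, List.mem_cons, List.not_mem_nil, or_false] at hf
            rcases hf with rfl|rfl|rfl|rfl|rfl|rfl|rfl|rfl|rfl|rfl|rfl <;> rfl
          · rw [if_neg h3]
            have hget : pvLocationFields.getD (sel.headD "") [] = [] := by
              simp only [List.headD_eq_head?_getD] at h1 h2 h3
              simp [pvLocationFields, PySem.Dict.getD, PySem.Dict.get?, Ne.symm h1, Ne.symm h2, Ne.symm h3]
            rw [pvSetShow_fold_true pvDynamicFields hnd "file_name" (by decide) _ bc, hget]
            refine pvFold_congr _ _ _ (fun f hf => ?_) bc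
            simp only [pvDynamicFields, List.mem_cons, List.not_mem_nil, or_false] at hf
            rcases hf with rfl|rfl|rfl|rfl|rfl|rfl|rfl|rfl|rfl|rfl|rfl <;> rfl
    · rw [if_neg hlen, if_neg hlen]
      exact (pvFold_congr pvDynamicFields _ _ (fun f _ => rfl) bc).symm
  · rw [if_pos hfn, if_pos hfn]
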